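-- pv_equiv track=rewrite | github.com/Mridu0w0/openGL-Project | GroupNo09_3D Snake Ladder Game.py | make_step_path
-- ===== SOURCE A (Python) =====
-- def make_step_path(start_cell, end_cell):
--     path = []
--     c = start_cell
--     step = 1 if end_cell >= start_cell else -1
--     while c != end_cell:
--         path.append((c, c + step))
--         c += step
--     return path
-- ===== SOURCE B (Python) =====
-- def make_step_path(start_cell, end_cell):
--     step = 1 if end_cell >= start_cell else -1
--     cells = list(range(start_cell, end_cell + step, step))
--     return list(zip(cells, cells[1:]))
-- ===== Notes on version B (the rewrite author's own statement) =====
-- stated objective: alternative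
-- what changed: Replaces the emit-as-you-go while loop with two passes: build the full cell sequence with range, then pair adjacent cells with zip.
import Mathlib
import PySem

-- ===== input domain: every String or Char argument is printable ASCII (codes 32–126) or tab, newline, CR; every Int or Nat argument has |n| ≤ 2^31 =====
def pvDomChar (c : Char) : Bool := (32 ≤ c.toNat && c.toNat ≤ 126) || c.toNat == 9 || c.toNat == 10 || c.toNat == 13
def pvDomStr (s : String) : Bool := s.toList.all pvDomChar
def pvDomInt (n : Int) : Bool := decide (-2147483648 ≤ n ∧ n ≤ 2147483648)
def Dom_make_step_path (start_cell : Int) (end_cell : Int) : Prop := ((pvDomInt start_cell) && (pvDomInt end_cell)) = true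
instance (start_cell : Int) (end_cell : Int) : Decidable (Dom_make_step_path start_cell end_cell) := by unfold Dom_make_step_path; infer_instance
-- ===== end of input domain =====

-- B builds the full cell sequence with range and pairs adjacent cells with zip,
-- instead of A's emit-as-you-go while loop; objective: alternative decomposition (same cost).

-- ===== PORT A =====
-- A's while loop, with fuel = the exact number of iterations |end - start|
-- (the loop test 'c != end_cell' is checked each round; at fuel 0, c = end_cell already).
def pvLoopA (endc step : Int) : Nat → Int → List (Int × Int)
  | 0, _ => []
  | n + 1, c => if c = endc then [] else (c, c + step) :: pvLoopA endc step n (c + step)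

def make_step_path (start_cell : Int) (end_cell : Int) : List (Int × Int) :=
  let step : Int := if end_cell ≥ start_cell then 1 else -1
  pvLoopA end_cell step (end_cell - start_cell).natAbs start_cell

-- ===== PORT B =====
def make_step_path_alt (start_cell : Int) (end_cell : Int) : List (Int × Int) :=
  let step : Int := if end_cell ≥ start_cell then 1 else -1
  let cells := PySem.List.pyRange start_cell (end_cell + step) step
  cells.zip cells.tail

-- ===== PRECONDITION & SPEC =====
def Spec_make_step_path (start_cell : Int) (end_cell : Int) (out : List (Int × Int)) : Prop := out = make_step_path_alt start_cell end_cell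
instance (start_cell : Int) (end_cell : Int) (out : List (Int × Int)) : Decidable (Spec_make_step_path start_cell end_cell out) := by unfold Spec_make_step_path; infer_instance

-- ===== CLAIM (what is proved, stated in full; the proofs are below) =====
def Claim_equal_make_step_path : Prop := ∀ (start_cell : Int) (end_cell : Int), Dom_make_step_path start_cell end_cell → Spec_make_step_path start_cell end_cell (make_step_path start_cell end_cell)

-- ===== LEMMAS AND PROOFS =====

lemma pvLoopA_up (e : Int) : ∀ (n : Nat) (c : Int), c + n = e →
    pvLoopA e 1 n c =
      (PySem.List.pyRange c (e + 1) 1).zip (PySem.List.pyRange c (e + 1) 1).tail := by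
  intro n
  induction n with
  | zero =>
    intro c h
    simp only [Nat.cast_zero, add_zero] at h
    subst h
    rw [PySem.List.pyRange_one_singleton]
    simp [pvLoopA]
  | succ n ih =>
    intro c h
    have hc : c < e := by omega
    have h1 : PySem.List.pyRange c (e + 1) 1 = c :: PySem.List.pyRange (c + 1) (e + 1) 1 :=
      PySem.List.pyRange_one_cons (by omega)
    have h2 : PySem.List.pyRange (c + 1) (e + 1) 1
        = (c + 1) :: PySem.List.pyRange (c + 1 + 1) (e + 1) 1 :=
      PySem.List.pyRange_one_cons (by omega)
    have ihc := ih (c + 1) (by push_cast at h ⊢; omega)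
    rw [h1, List.tail_cons, h2, List.zip_cons_cons]
    simp only [pvLoopA, if_neg hc.ne]
    rw [ihc, h2, List.tail_cons]

lemma pvLoopA_down (e : Int) : ∀ (n : Nat) (c : Int), c - n = e →
    pvLoopA e (-1) n c =
      (PySem.List.pyRange c (e - 1) (-1)).zip (PySem.List.pyRange c (e - 1) (-1)).tail := by
  intro n
  induction n with
  | zero =>
    intro c h
    simp only [Nat.cast_zero, sub_zero] at h
    subst h
    rw [PySem.List.pyRange_neg_one_cons (by omega), PySem.List.pyRange_neg_one_eq_nil (by omega)]
    simp [pvLoopA]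
  | succ n ih =>
    intro c h
    have hc : e < c := by omega
    have h1 : PySem.List.pyRange c (e - 1) (-1)
        = c :: PySem.List.pyRange (c - 1) (e - 1) (-1) :=
      PySem.List.pyRange_neg_one_cons (by omega)
    have h2 : PySem.List.pyRange (c - 1) (e - 1) (-1)
        = (c - 1) :: PySem.List.pyRange (c - 1 - 1) (e - 1) (-1) :=
      PySem.List.pyRange_neg_one_cons (by omega)
    have ihc := ih (c - 1) (by push_cast at h ⊢; omega)
    rw [h1, List.tail_cons, h2, List.zip_cons_cons]
    simp only [pvLoopA, if_neg hc.ne']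
    have hcm : c + -1 = c - 1 := by ring
    rw [hcm, ihc, h2, List.tail_cons]

-- ===== VERDICT (by name: the statement is the Claim_ definition above) =====
theorem make_step_path_spec : Claim_equal_make_step_path := by
  intro s e _
  unfold Spec_make_step_path make_step_path make_step_path_alt
  by_cases hse : e ≥ s
  · simp only [if_pos hse]
    exact pvLoopA_up e (e - s).natAbs s (by omega)
  · simp only [if_neg hse]
    have : e + -1 = e - 1 := by ring
    rw [this]
    exact pvLoopA_down e (e - s).natAbs s (by omega)
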